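-- pv_equiv track=rewrite | github.com/pablintino/pbtn.common | plugins/modules/nftables_apply.py | __parse_validation_errors
-- ===== SOURCE A (Python) =====
-- def __parse_validation_errors(path, validation_message):
--     messages = []
--     message = None
--     for err_line in validation_message.splitlines():
--         if err_line.startswith(path):
--             if message:
--                 messages.append(message)
--             message = {"error": err_line}
--         elif message != None and "detail" not in message:
--             message["detail"] = err_line.strip()
--     if message:
--         messages.append(message)
--
--     return messages
-- ===== SOURCE B (Python) =====
-- def __parse_validation_errors(path, validation_message):
--     lines = validation_message.splitlines()
--     messages = []
--     for i, line in enumerate(lines):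
--         if not line.startswith(path):
--             continue
--         msg = {"error": line}
--         if i + 1 < len(lines) and not lines[i + 1].startswith(path):
--             msg["detail"] = lines[i + 1].strip()
--         messages.append(msg)
--     return messages
-- ===== Notes on version B (the rewrite author's own statement) =====
-- stated objective: simpler
-- what changed: Replaces A's state machine (a carried pending dict plus an end-of-loop flush) with a header-plus-lookahead pass: each line starting with path emits a message immediately, taking its detail from the next line if that line is not a header.
import Mathlib
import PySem

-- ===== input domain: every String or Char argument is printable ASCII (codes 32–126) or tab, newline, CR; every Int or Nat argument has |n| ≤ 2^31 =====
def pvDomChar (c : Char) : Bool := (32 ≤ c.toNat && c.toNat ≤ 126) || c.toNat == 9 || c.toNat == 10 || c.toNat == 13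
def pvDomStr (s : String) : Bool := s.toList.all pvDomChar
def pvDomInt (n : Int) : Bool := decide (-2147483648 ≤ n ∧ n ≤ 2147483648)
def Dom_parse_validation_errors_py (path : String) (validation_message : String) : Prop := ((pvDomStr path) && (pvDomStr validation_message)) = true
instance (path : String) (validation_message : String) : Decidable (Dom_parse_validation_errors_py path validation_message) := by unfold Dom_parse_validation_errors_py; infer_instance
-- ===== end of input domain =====

-- B replaces A's carried-pending-dict state machine (with end-of-loop flush) by a single
-- header-plus-lookahead pass; same return values, no speed claim (objective: simpler).

-- ===== PORT A =====
-- dict ported by hand as an assoc list: keys here are only the distinct literals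
-- "error"/"detail", so 'k in d' is a key scan and 'd[k] = v' on a fresh key appends — exact.
def pvStepA (path : String)
    (st : List (List (String × String)) × Option (List (String × String)))
    (err_line : String) :
    List (List (String × String)) × Option (List (String × String)) :=
  if PySem.Str.startswith err_line path then
    (match st.2 with
     | some m => if m.isEmpty then st.1 else st.1 ++ [m]
     | none => st.1,
     some [("error", err_line)])
  else
    match st.2 with
    | some m =>
        if m.any (fun p => p.1 == "detail") then st
        else (st.1, some (m ++ [("detail", PySem.Str.strip err_line)]))
    | none => st

def parse_validation_errors_py (path : String) (validation_message : String) :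
    List (List (String × String)) :=
  let fin := (PySem.Str.splitlines validation_message).foldl (pvStepA path) ([], none)
  match fin.2 with
  | some m => if m.isEmpty then fin.1 else fin.1 ++ [m]
  | none => fin.1

-- ===== PORT B =====
-- B's indexed loop with lookahead at lines[i+1], transcribed as recursion peeking at the tail's head.
def pvGoB (path : String) : List String → List (List (String × String))
  | [] => []
  | l :: rest =>
    if PySem.Str.startswith l path then
      (match rest with
       | next :: _ =>
           if PySem.Str.startswith next path then [("error", l)]
           else [("error", l), ("detail", PySem.Str.strip next)]
       | [] => [("error", l)]) :: pvGoB path rest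
    else pvGoB path rest

def parse_validation_errors_py_alt (path : String) (validation_message : String) :
    List (List (String × String)) :=
  pvGoB path (PySem.Str.splitlines validation_message)

-- ===== PRECONDITION & SPEC =====
def Spec_parse_validation_errors_py (path : String) (validation_message : String) (out : List (List (String × String))) : Prop := out = parse_validation_errors_py_alt path validation_message
instance (path : String) (validation_message : String) (out : List (List (String × String))) : Decidable (Spec_parse_validation_errors_py path validation_message out) := by unfold Spec_parse_validation_errors_py; infer_instance

-- ===== CLAIM (what is proved, stated in full; the proofs are below) =====
def Claim_equal_parse_validation_errors_py : Prop := ∀ (path : String) (validation_message : String), Dom_parse_validation_errors_py path validation_message → Spec_parse_validation_errors_py path validation_message (parse_validation_errors_py path validation_message)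

-- ===== LEMMAS AND PROOFS =====

-- the value the pending header-only message [("error", e)] ends up with, given the remaining lines
def pvPend (path e : String) : List String → List (String × String)
  | [] => [("error", e)]
  | l :: _ =>
    if PySem.Str.startswith l path then [("error", e)]
    else [("error", e), ("detail", PySem.Str.strip l)]

def pvFinish (st : List (List (String × String)) × Option (List (String × String))) :
    List (List (String × String)) :=
  match st.2 with
  | some m => if m.isEmpty then st.1 else st.1 ++ [m]
  | none => st.1

-- combined loop invariant for the three reachable pending states of A's fold
theorem pvA_inv (path : String) (lines : List String) :
    (∀ msgs, pvFinish (lines.foldl (pvStepA path) (msgs, none)) = msgs ++ pvGoB path lines) ∧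
    (∀ msgs e, pvFinish (lines.foldl (pvStepA path) (msgs, some [("error", e)])) =
        msgs ++ pvPend path e lines :: pvGoB path lines) ∧
    (∀ msgs e d, pvFinish (lines.foldl (pvStepA path) (msgs, some [("error", e), ("detail", d)])) =
        msgs ++ [("error", e), ("detail", d)] :: pvGoB path lines) := by
  induction lines with
  | nil => simp [pvFinish, pvGoB, pvPend]
  | cons l rest ih =>
    obtain ⟨ih1, ih2, ih3⟩ := ih
    refine ⟨?_, ?_, ?_⟩
    · intro msgs
      by_cases h : PySem.Chars.startswith l.toList path.toList = true
      · have hs : pvStepA path (msgs, none) l = (msgs, some [("error", l)]) := by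
          simp [pvStepA, h]
        rw [List.foldl_cons, hs, ih2]
        cases rest <;> simp [pvGoB, pvPend, h]
      · have hs : pvStepA path (msgs, none) l = (msgs, none) := by simp [pvStepA, h]
        rw [List.foldl_cons, hs, ih1]
        simp [pvGoB, h]
    · intro msgs e
      by_cases h : PySem.Chars.startswith l.toList path.toList = true
      · have hs : pvStepA path (msgs, some [("error", e)]) l =
            (msgs ++ [[("error", e)]], some [("error", l)]) := by simp [pvStepA, h]
        rw [List.foldl_cons, hs, ih2]
        cases rest <;> simp [pvGoB, pvPend, h]
      · have hs : pvStepA path (msgs, some [("error", e)]) l =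
            (msgs, some [("error", e), ("detail", PySem.Str.strip l)]) := by
          simp [pvStepA, h]
        rw [List.foldl_cons, hs, ih3]
        simp [pvGoB, pvPend, h]
    · intro msgs e d
      by_cases h : PySem.Chars.startswith l.toList path.toList = true
      · have hs : pvStepA path (msgs, some [("error", e), ("detail", d)]) l =
            (msgs ++ [[("error", e), ("detail", d)]], some [("error", l)]) := by
          simp [pvStepA, h]
        rw [List.foldl_cons, hs, ih2]
        cases rest <;> simp [pvGoB, pvPend, h]
      · have hs : pvStepA path (msgs, some [("error", e), ("detail", d)]) l =
            (msgs, some [("error", e), ("detail", d)]) := by simp [pvStepA, h]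
        rw [List.foldl_cons, hs, ih3]
        simp [pvGoB, h]

-- ===== VERDICT (by name: the statement is the Claim_ definition above) =====
theorem parse_validation_errors_py_spec : Claim_equal_parse_validation_errors_py := by
  intro path vm _
  unfold Spec_parse_validation_errors_py parse_validation_errors_py parse_validation_errors_py_alt
  have h := (pvA_inv path (PySem.Str.splitlines vm)).1 []
  simpa [pvFinish] using h
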